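-- pv_equiv track=rewrite | github.com/yingl/LintCodeInPython | x-of-a-kind-in-a-deck-of-cards.py | hasGroupsSizeX
-- ===== SOURCE A (Python) =====
-- def hasGroupsSizeX(deck):
--     # write your code here
--     # 分组统计后只要找到找到大于1的最大公约数即可
--     if len(deck) < 2:
--         return False
--     di = {}
--     for d in deck:
--         if d not in di:
--             di[d] = 1
--         else:
--             di[d] += 1
--     m = min(di.values())
--     for i in range(2, m + 1):
--         match = True
--         for v in di.values():
--             if v % i != 0:
--                 match = False
--                 break
--         if match:
--             return match
--     return False
-- ===== SOURCE B (Python) =====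
-- def hasGroupsSizeX(deck):
--     if len(deck) < 2:
--         return False
--     counts = {}
--     for d in deck:
--         counts[d] = counts.get(d, 0) + 1
--     vals = list(counts.values())
--     g = vals[0]
--     for c in vals[1:]:
--         a, b = g, c
--         while b:
--             a, b = b, a % b
--         g = a
--     return g >= 2
-- ===== Notes on version B (the rewrite author's own statement) =====
-- stated objective: alternative
-- what changed: A searches every candidate divisor i in 2..min(counts) and tests all counts for divisibility by each; B folds the counts with an explicit Euclidean-gcd loop and returns whether the gcd is >= 2.
import Mathlib
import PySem

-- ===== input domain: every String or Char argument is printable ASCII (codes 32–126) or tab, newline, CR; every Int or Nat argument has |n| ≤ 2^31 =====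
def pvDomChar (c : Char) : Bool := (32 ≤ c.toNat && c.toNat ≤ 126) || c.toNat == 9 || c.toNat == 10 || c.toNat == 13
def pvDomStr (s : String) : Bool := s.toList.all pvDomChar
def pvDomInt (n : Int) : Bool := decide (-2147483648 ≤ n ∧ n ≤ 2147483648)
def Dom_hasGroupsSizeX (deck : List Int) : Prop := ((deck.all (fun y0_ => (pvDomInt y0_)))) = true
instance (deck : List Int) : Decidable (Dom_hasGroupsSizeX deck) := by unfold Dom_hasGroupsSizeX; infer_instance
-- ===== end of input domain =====

-- B replaces A's trial search over every candidate divisor 2..min(counts) by a single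
-- Euclidean-gcd reduction over the counts (alternative algorithm, same measured cost).

-- ===== PORT A =====
def hasGroupsSizeX (deck : List Int) : Bool :=
  if deck.length < 2 then false
  else
    let di : PySem.Dict Int Int :=
      deck.foldl (fun di d => if di.contains d then di.modify d 0 (· + 1) else di.insert d 1)
        PySem.Dict.empty
    match PySem.List.min? di.values (fun v => v) with
    | none => false   -- unreachable: deck.length ≥ 2, so di.values ≠ [] and Python's min returns
    | some m =>
      (PySem.List.pyRange 2 (m + 1) 1).any (fun i =>
        di.values.all (fun v => PySem.Int.mod v i == 0))

-- ===== PORT B =====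
-- the `while b: a, b = b, a % b` inner loop of Source B
def euclidGcd (a b : Int) : Int :=
  if _hb : b = 0 then a
  else euclidGcd b (PySem.Int.mod a b)
termination_by b.natAbs
decreasing_by
  rcases lt_or_gt_of_ne _hb with hneg | hpos
  · have := PySem.Int.mod_neg_bounds a hneg; omega
  · have h1 := PySem.Int.mod_nonneg a hpos
    have h2 := PySem.Int.mod_lt a hpos; omega

def hasGroupsSizeX_alt (deck : List Int) : Bool :=
  if deck.length < 2 then false
  else
    let counts : PySem.Dict Int Int :=
      deck.foldl (fun d x => d.insert x (d.getD x 0 + 1)) PySem.Dict.empty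
    match counts.values with
    | [] => false   -- unreachable: deck.length ≥ 2, so vals[0] in Source B never sees an empty list
    | v :: rest => decide (2 ≤ rest.foldl euclidGcd v)

-- ===== PRECONDITION & SPEC =====
def Spec_hasGroupsSizeX (deck : List Int) (out : Bool) : Prop := out = hasGroupsSizeX_alt deck
instance (deck : List Int) (out : Bool) : Decidable (Spec_hasGroupsSizeX deck out) := by unfold Spec_hasGroupsSizeX; infer_instance

-- ===== CLAIM (what is proved, stated in full; the proofs are below) =====
def Claim_equal_hasGroupsSizeX : Prop := ∀ (deck : List Int), Dom_hasGroupsSizeX deck → Spec_hasGroupsSizeX deck (hasGroupsSizeX deck)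

-- ===== LEMMAS AND PROOFS =====

-- A's counting loop is Counter(deck): its step function is pointwise Counter's step
lemma stepA_eq :
    (fun (di : PySem.Dict Int Int) (d : Int) =>
      if di.contains d then di.modify d 0 (· + 1) else di.insert d 1)
    = (fun (di : PySem.Dict Int Int) (d : Int) => di.modify d 0 (· + 1)) := by
  funext di d
  by_cases h : di.contains d
  · simp [h]
  · simp only [Bool.not_eq_true] at h
    simp only [h, Bool.false_eq_true, if_false, PySem.Dict.modify,
      PySem.Dict.getD_of_not_contains di 0 h, zero_add]

lemma dictA_eq (deck : List Int) :
    deck.foldl (fun di d => if di.contains d then di.modify d 0 (· + 1) else di.insert d 1)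
      PySem.Dict.empty = PySem.Dict.counter deck := by
  rw [stepA_eq]; rfl

lemma counter_values (deck : List Int) :
    (PySem.Dict.counter deck).values
      = (PySem.Set.ofList deck).map (fun k => (List.count k deck : Int)) := by
  simp [PySem.Dict.values, PySem.Dict.items_counter]

lemma counter_values_pos (deck : List Int) :
    ∀ x ∈ (PySem.Dict.counter deck).values, 1 ≤ x := by
  intro x hx
  rw [counter_values] at hx
  obtain ⟨k, hk, rfl⟩ := List.mem_map.mp hx
  have : k ∈ deck := (PySem.Set.mem_ofList deck k).mp hk
  have := List.count_pos_iff.mpr this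
  omega

-- the Euclidean loop computes gcd (on the nonnegative inputs it sees)
lemma euclid_eq_gcd (n : Nat) :
    ∀ a b : Int, b.natAbs = n → 0 ≤ a → 0 ≤ b → euclidGcd a b = (Int.gcd a b : Int) := by
  induction n using Nat.strong_induction_on with
  | _ n ih =>
    intro a b hn ha hb
    rw [euclidGcd]
    split_ifs with h
    · subst h; simp [Int.natAbs_of_nonneg ha]
    · have hpos : 0 < b := by omega
      rw [PySem.Int.mod_eq_emod_of_pos hpos]
      have h0 : 0 ≤ a % b := Int.emod_nonneg a (by omega)
      have hlt : (a % b).natAbs < n := by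
        have := Int.emod_lt_of_pos a hpos; omega
      rw [ih (a % b).natAbs hlt b (a % b) rfl hb h0, Int.gcd_comm, Int.gcd_emod]

lemma foldl_euclid (t : List Int) :
    ∀ v : Int, 0 ≤ v → (∀ c ∈ t, 0 ≤ c) →
      t.foldl euclidGcd v = (((t.map Int.natAbs).foldl Nat.gcd v.natAbs : Nat) : Int) := by
  induction t with
  | nil => intro v hv _; simpa using (Int.natAbs_of_nonneg hv).symm
  | cons c t ih =>
    intro v hv hall
    simp only [List.foldl_cons, List.map_cons]
    rw [euclid_eq_gcd c.natAbs v c rfl hv (hall c (by simp))]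
    rw [ih _ (Int.natCast_nonneg _) (fun x hx => hall x (by simp [hx]))]
    rw [Int.natAbs_natCast, Int.gcd_eq_natAbs_gcd_natAbs]

lemma foldl_gcd_dvd (l : List Nat) (a : Nat) :
    (l.foldl Nat.gcd a) ∣ a ∧ ∀ x ∈ l, (l.foldl Nat.gcd a) ∣ x := by
  induction l generalizing a with
  | nil => simp
  | cons c t ih =>
    obtain ⟨h1, h2⟩ := ih (Nat.gcd a c)
    refine ⟨h1.trans (Nat.gcd_dvd_left a c), ?_⟩
    intro x hx
    rcases List.mem_cons.mp hx with rfl | hx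
    · exact h1.trans (Nat.gcd_dvd_right a x)
    · exact h2 x hx

lemma dvd_foldl_gcd (l : List Nat) (a d : Nat) (h : d ∣ a) (h2 : ∀ x ∈ l, d ∣ x) :
    d ∣ l.foldl Nat.gcd a := by
  induction l generalizing a with
  | nil => exact h
  | cons c t ih =>
    exact ih (Nat.gcd a c) (Nat.dvd_gcd h (h2 c (by simp))) (fun x hx => h2 x (by simp [hx]))

-- core: for a nonempty list of positive counts, A's divisor search over 2..min equals B's gcd test
lemma core (v : Int) (rest : List Int) (hpos : ∀ x ∈ v :: rest, 1 ≤ x) :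
    ((PySem.List.pyRange 2 (rest.foldl min v + 1) 1).any
      (fun i => (v :: rest).all (fun x => PySem.Int.mod x i == 0)))
    = decide (2 ≤ rest.foldl euclidGcd v) := by
  have hnn : ∀ x ∈ v :: rest, (0:Int) ≤ x := fun x hx => le_trans (by norm_num) (hpos x hx)
  rw [foldl_euclid rest v (hnn v (by simp)) (fun c hc => hnn c (by simp [hc]))]
  set N : Nat := (rest.map Int.natAbs).foldl Nat.gcd v.natAbs with hN
  have hdvd := foldl_gcd_dvd (rest.map Int.natAbs) v.natAbs
  have hNdvd : ∀ x ∈ v :: rest, (N : Int) ∣ x := by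
    intro x hx
    have hdx : N ∣ x.natAbs := by
      rcases List.mem_cons.mp hx with rfl | hx'
      · exact hdvd.1
      · exact hdvd.2 x.natAbs (List.mem_map.mpr ⟨x, hx', rfl⟩)
    have hx0 : (x.natAbs : Int) = x := Int.natAbs_of_nonneg (hnn x hx)
    exact hx0 ▸ Int.natCast_dvd_natCast.mpr hdx
  have hNpos : 0 < N := by
    rcases Nat.eq_zero_or_pos N with h0 | h
    · exfalso
      have hvd : N ∣ v.natAbs := hdvd.1
      rw [h0] at hvd
      have hv0 : v.natAbs = 0 := Nat.eq_zero_of_zero_dvd hvd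
      have := hpos v (by simp)
      omega
    · exact h
  have hmem := PySem.List.foldl_min_mem rest v
  have hmle := PySem.List.foldl_min_le rest v
  have hm_in : rest.foldl min v ∈ v :: rest := by
    rcases hmem with h | h
    · rw [h]; simp
    · exact List.mem_cons_of_mem v h
  rw [Bool.eq_iff_iff]
  simp only [List.any_eq_true, List.all_eq_true, PySem.List.mem_pyRange_one, beq_iff_eq,
    PySem.Int.mod_eq_zero_iff_dvd, decide_eq_true_eq]
  constructor
  · rintro ⟨i, ⟨hi2, hilt⟩, hall⟩
    have hd : i.natAbs ∣ N :=
      dvd_foldl_gcd (rest.map Int.natAbs) v.natAbs i.natAbs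
        (Int.natAbs_dvd_natAbs.mpr (hall v (by simp)))
        (by
          intro y hy
          obtain ⟨x, hx, rfl⟩ := List.mem_map.mp hy
          exact Int.natAbs_dvd_natAbs.mpr (hall x (List.mem_cons_of_mem v hx)))
    have := Nat.le_of_dvd hNpos hd
    omega
  · intro h2N
    refine ⟨(N : Int), ⟨by omega, ?_⟩, fun x hx => hNdvd x hx⟩
    have hdm : (N : Int) ∣ rest.foldl min v := hNdvd _ hm_in
    have hm1 : 1 ≤ rest.foldl min v := hpos _ hm_in
    have := Int.le_of_dvd (by omega) hdm
    omega

-- ===== VERDICT (by name: the statement is the Claim_ definition above) =====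
theorem hasGroupsSizeX_spec : Claim_equal_hasGroupsSizeX := by
  intro deck _
  unfold Spec_hasGroupsSizeX hasGroupsSizeX hasGroupsSizeX_alt
  by_cases hlen : deck.length < 2
  · simp [hlen]
  · simp only [if_neg hlen, dictA_eq, PySem.Dict.foldl_insert_getD_add_one_eq_counter]
    have hdne : deck ≠ [] := by
      intro h; subst h; simp at hlen
    obtain ⟨v, rest, hvr⟩ : ∃ v rest, (PySem.Dict.counter deck).values = v :: rest := by
      cases hv : (PySem.Dict.counter deck).values with
      | nil =>
        exfalso
        obtain ⟨d, t, rfl⟩ := List.exists_cons_of_ne_nil hdne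
        rw [counter_values] at hv
        have hd : d ∈ PySem.Set.ofList (d :: t) := (PySem.Set.mem_ofList _ d).mpr (by simp)
        rcases List.map_eq_nil_iff.mp hv with h
        simp [h] at hd
      | cons a t => exact ⟨a, t, rfl⟩
    have hpos : ∀ x ∈ v :: rest, (1:Int) ≤ x := by
      rw [← hvr]; exact counter_values_pos deck
    rw [hvr, PySem.List.min?_id_cons]
    exact core v rest hpos
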